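-- pv_equiv track=rewrite | github.com/usernotfound-101/QIDKBenchMarksScripts | RAG/rag_benchmark.py | overlap_counts
-- ===== SOURCE A (Python) =====
-- from typing import Any, Dict, Iterable, List, Optional, Sequence, Tuple
--
-- def overlap_counts(pred_tokens: List[str], gold_tokens: List[str]) -> int:
--     freq: Dict[str, int] = {}
--     for token in gold_tokens:
--         freq[token] = freq.get(token, 0) + 1
--     overlap = 0
--     for token in pred_tokens:
--         if freq.get(token, 0) > 0:
--             overlap += 1
--             freq[token] -= 1
--     return overlap
-- ===== SOURCE B (Python) =====
-- def overlap_counts(pred_tokens, gold_tokens):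
--     pred_freq = {}
--     for t in pred_tokens:
--         pred_freq[t] = pred_freq.get(t, 0) + 1
--     gold_freq = {}
--     for t in gold_tokens:
--         gold_freq[t] = gold_freq.get(t, 0) + 1
--     return sum(min(c, gold_freq.get(t, 0)) for t, c in pred_freq.items())
-- ===== Notes on version B (the rewrite author's own statement) =====
-- stated objective: alternative
-- what changed: A's decrement-while-scanning-pred loop over a mutable gold-frequency dict is replaced by building frequency tables for BOTH lists once and summing min(pred_count, gold_count) per distinct predicted token.
import Mathlib
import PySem

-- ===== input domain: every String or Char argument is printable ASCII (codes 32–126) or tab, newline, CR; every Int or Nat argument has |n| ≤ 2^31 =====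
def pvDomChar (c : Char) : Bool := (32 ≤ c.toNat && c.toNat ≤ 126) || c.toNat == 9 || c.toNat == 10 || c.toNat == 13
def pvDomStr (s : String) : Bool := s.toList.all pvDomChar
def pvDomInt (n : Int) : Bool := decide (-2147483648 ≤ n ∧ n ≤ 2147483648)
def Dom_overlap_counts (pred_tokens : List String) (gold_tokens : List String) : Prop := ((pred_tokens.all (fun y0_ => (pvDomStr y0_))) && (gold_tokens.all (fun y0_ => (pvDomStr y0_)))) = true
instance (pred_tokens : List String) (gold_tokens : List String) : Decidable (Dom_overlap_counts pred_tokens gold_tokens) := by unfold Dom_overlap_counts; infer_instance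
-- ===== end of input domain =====

-- B replaces A's decrement-while-scanning loop over a mutable gold-frequency dict by two
-- frequency tables and a per-distinct-token min sum (alternative decomposition, same cost).


-- ===== PORT A =====
-- 'freq[token] -= 1' runs only when freq.get(token, 0) > 0, so the key is present and
-- Dict.modify token 0 (· - 1) is exact there.
def overlap_counts (pred_tokens : List String) (gold_tokens : List String) : Int :=
  (pred_tokens.foldl
    (fun (s : PySem.Dict String Int × Int) token =>
      if s.1.getD token 0 > 0 then (s.1.modify token 0 (· - 1), s.2 + 1) else s)
    (gold_tokens.foldl (fun d token => d.insert token (d.getD token 0 + 1)) PySem.Dict.empty,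
     0)).2

-- ===== PORT B =====
def overlap_counts_alt (pred_tokens : List String) (gold_tokens : List String) : Int :=
  (pred_tokens.foldl (fun d t => d.insert t (d.getD t 0 + 1)) PySem.Dict.empty).items.foldl
    (fun acc p => acc + min p.2
      ((gold_tokens.foldl (fun d t => d.insert t (d.getD t 0 + 1)) PySem.Dict.empty).getD p.1 0))
    0

-- ===== PRECONDITION & SPEC =====
def Spec_overlap_counts (pred_tokens : List String) (gold_tokens : List String) (out : Int) : Prop := out = overlap_counts_alt pred_tokens gold_tokens
instance (pred_tokens : List String) (gold_tokens : List String) (out : Int) : Decidable (Spec_overlap_counts pred_tokens gold_tokens out) := by unfold Spec_overlap_counts; infer_instance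

-- ===== CLAIM (what is proved, stated in full; the proofs are below) =====
def Claim_equal_overlap_counts : Prop := ∀ (pred_tokens : List String) (gold_tokens : List String), Dom_overlap_counts pred_tokens gold_tokens → Spec_overlap_counts pred_tokens gold_tokens (overlap_counts pred_tokens gold_tokens)

-- ===== LEMMAS AND PROOFS =====

-- Sums over a duplicate-free list that differ at exactly one element.
lemma sum_map_one_point (K : List String) (hK : K.Nodup) (p : String) (hp : p ∈ K)
    (f g : String → Int) (hfg : ∀ k, k ≠ p → f k = g k) :
    (K.map f).sum = (K.map g).sum + (f p - g p) := by
  induction K with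
  | nil => cases hp
  | cons a t ih =>
    rcases List.mem_cons.mp hp with h | h
    · subst h
      have ht : t.map f = t.map g :=
        List.map_congr_left (fun k hk => hfg k (fun e => (List.nodup_cons.mp hK).1 (e ▸ hk)))
      simp [ht]; ring
    · have ha : a ≠ p := fun e => (List.nodup_cons.mp hK).1 (e ▸ h)
      simp only [List.map_cons, List.sum_cons, hfg a ha, ih (List.nodup_cons.mp hK).2 h]
      ring

-- A's scanning loop computes, for any key list K ⊇ pred with no duplicates, the sum of
-- per-key minima of pred-count and remaining dict value.
lemma loopA_eq (pred : List String) (K : List String) (hK : K.Nodup)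
    (hsub : ∀ t ∈ pred, t ∈ K) :
    ∀ (d : PySem.Dict String Int) (acc : Int), (∀ t, 0 ≤ d.getD t 0) →
    (pred.foldl
      (fun (s : PySem.Dict String Int × Int) token =>
        if s.1.getD token 0 > 0 then (s.1.modify token 0 (· - 1), s.2 + 1) else s)
      (d, acc)).2
      = acc + (K.map (fun k => min ((pred.count k : Int)) (d.getD k 0))).sum := by
  induction pred with
  | nil =>
    intro d acc hd
    simp only [List.foldl_nil, List.count_nil, Nat.cast_zero]
    have hz : K.map (fun k => min (0 : Int) (d.getD k 0)) = K.map (fun _ => (0 : Int)) :=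
      List.map_congr_left (fun k _ => min_eq_left (hd k))
    rw [hz]
    simp
  | cons p ps ih =>
    intro d acc hd
    have hsub' : ∀ t ∈ ps, t ∈ K := fun t ht => hsub t (List.mem_cons_of_mem _ ht)
    simp only [List.foldl_cons]
    by_cases h : d.getD p 0 > 0
    · simp only [h, if_pos]
      have hd' : ∀ t, 0 ≤ (d.modify p 0 (· - 1)).getD t 0 := by
        intro t
        rw [PySem.Dict.getD_modify]
        split_ifs with he
        · subst he; omega
        · exact hd t
      rw [ih hsub' _ _ hd']
      have hsum := sum_map_one_point K hK p (hsub p (List.mem_cons_self))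
        (fun k => min (((p :: ps).count k : Int)) (d.getD k 0))
        (fun k => min ((ps.count k : Int)) ((d.modify p 0 (· - 1)).getD k 0))
        (by
          intro k hk
          simp [PySem.Dict.getD_modify, hk, hk.symm])
      rw [hsum]
      have h1 : min ((((p :: ps).count p : Nat) : Int)) (d.getD p 0)
          - min ((ps.count p : Int)) ((d.modify p 0 (· - 1)).getD p 0) = 1 := by
        simp only [PySem.Dict.getD_modify, List.count_cons_self]
        push_cast
        omega
      rw [h1]; ring
    · simp only [h, if_neg, not_false_iff]
      rw [ih hsub' _ _ hd]
      have hcongr : K.map (fun k => min (((p :: ps).count k : Int)) (d.getD k 0))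
          = K.map (fun k => min ((ps.count k : Int)) (d.getD k 0)) := by
        apply List.map_congr_left; intro k _
        by_cases he : k = p
        · subst he
          have := hd k
          simp only [List.count_cons_self]
          push_cast
          omega
        · simp [Ne.symm he]
      rw [hcongr]

-- A equals the per-distinct-predicted-token min sum.
lemma overlap_counts_eq_sum (pred gold : List String) :
    overlap_counts pred gold
      = ((PySem.Set.ofList pred).map
          (fun k => min ((pred.count k : Int)) ((gold.count k : Int)))).sum := by
  unfold overlap_counts
  rw [PySem.Dict.foldl_insert_getD_add_one_eq_counter]
  rw [loopA_eq pred (PySem.Set.ofList pred) (PySem.Set.nodup_ofList pred)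
      (fun t ht => (PySem.Set.mem_ofList _ _).mpr ht)
      _ _ (fun t => by rw [PySem.Dict.getD_counter]; positivity)]
  simp [PySem.Dict.getD_counter]

-- B equals the same sum.
lemma overlap_counts_alt_eq_sum (pred gold : List String) :
    overlap_counts_alt pred gold
      = ((PySem.Set.ofList pred).map
          (fun k => min ((pred.count k : Int)) ((gold.count k : Int)))).sum := by
  unfold overlap_counts_alt
  rw [PySem.Dict.foldl_insert_getD_add_one_eq_counter,
      PySem.Dict.foldl_insert_getD_add_one_eq_counter]
  rw [PySem.List.foldl_add (g := fun p : String × Int =>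
        min p.2 ((PySem.Dict.counter gold).getD p.1 0))]
  simp [PySem.Dict.items_counter, PySem.Dict.getD_counter, List.map_map, Function.comp_def]

-- ===== VERDICT (by name: the statement is the Claim_ definition above) =====
theorem overlap_counts_spec : Claim_equal_overlap_counts := by
  intro pred gold _
  unfold Spec_overlap_counts
  rw [overlap_counts_eq_sum, overlap_counts_alt_eq_sum]
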